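-- pv_equiv track=rewrite | github.com/Qingyon-AI/Revornix | celery-worker/workflow/timing.py | _format_state_delta
-- ===== SOURCE A (Python) =====
-- from typing import Any, Callable
--
-- def _preview_keys(keys: list[str], *, limit: int = 8) -> str:
--     if not keys:
--         return "-"
--     if len(keys) <= limit:
--         return ",".join(keys)
--     return ",".join(keys[:limit]) + ",..."
--
-- def _format_state_delta(before: Any, after: Any) -> str:
--     if not isinstance(before, dict) or not isinstance(after, dict):
--         return "state_delta=unavailable"
--
--     before_keys = set(before.keys())
--     after_keys = set(after.keys())
--     added_keys = sorted(after_keys - before_keys)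
--     removed_keys = sorted(before_keys - after_keys)
--     shared_keys = before_keys & after_keys
--     changed_keys = sorted(
--         key for key in shared_keys
--         if before.get(key) != after.get(key)
--     )
--
--     return (
--         "state_delta="
--         f"added[{len(added_keys)}]={_preview_keys(added_keys)}; "
--         f"changed[{len(changed_keys)}]={_preview_keys(changed_keys)}; "
--         f"removed[{len(removed_keys)}]={_preview_keys(removed_keys)}"
--     )
-- ===== SOURCE B (Python) =====
-- from typing import Any
--
--
-- def _preview_keys(keys: list[str], *, limit: int = 8) -> str:
--     if not keys:
--         return "-"
--     if len(keys) <= limit: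
--         return ",".join(keys)
--     return ",".join(keys[:limit]) + ",..."
--
--
-- def _format_state_delta(before: Any, after: Any) -> str:
--     if not isinstance(before, dict) or not isinstance(after, dict):
--         return "state_delta=unavailable"
--
--     bks = sorted(before)
--     aks = sorted(after)
--     added: list[str] = []
--     changed: list[str] = []
--     removed: list[str] = []
--     i = j = 0
--     while i < len(bks) and j < len(aks):
--         if bks[i] < aks[j]:
--             removed.append(bks[i])
--             i += 1
--         elif bks[i] > aks[j]:
--             added.append(aks[j])
--             j += 1
--         else:
--             if before[bks[i]] != after[aks[j]]:
--                 changed.append(bks[i])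
--             i += 1
--             j += 1
--     removed.extend(bks[i:])
--     added.extend(aks[j:])
--
--     return (
--         "state_delta="
--         f"added[{len(added)}]={_preview_keys(added)}; "
--         f"changed[{len(changed)}]={_preview_keys(changed)}; "
--         f"removed[{len(removed)}]={_preview_keys(removed)}"
--     )
-- ===== Notes on version B (the rewrite author's own statement) =====
-- stated objective: alternative
-- what changed: Replaces A's three set operations (two set differences plus an intersection filtered by value inequality, each sorted afterwards) by sorting both key lists up front and classifying added/changed/removed in a single two-pointer merge sweep with no membership tests; the three lists come out already in sorted order.
import Mathlib
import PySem

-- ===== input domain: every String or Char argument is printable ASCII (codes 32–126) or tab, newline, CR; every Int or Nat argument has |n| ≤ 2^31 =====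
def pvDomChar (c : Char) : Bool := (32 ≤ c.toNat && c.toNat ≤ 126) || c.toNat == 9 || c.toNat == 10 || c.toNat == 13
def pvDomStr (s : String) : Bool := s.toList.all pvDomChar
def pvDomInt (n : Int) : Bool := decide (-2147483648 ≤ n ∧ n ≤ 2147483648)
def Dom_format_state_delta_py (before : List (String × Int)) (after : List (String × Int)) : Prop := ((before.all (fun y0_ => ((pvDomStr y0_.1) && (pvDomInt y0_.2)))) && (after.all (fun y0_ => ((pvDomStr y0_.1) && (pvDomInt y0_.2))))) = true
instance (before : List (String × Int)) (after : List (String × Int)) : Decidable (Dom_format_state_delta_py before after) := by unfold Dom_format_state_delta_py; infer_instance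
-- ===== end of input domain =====

-- B replaces A's three set operations by sorting both key lists and classifying
-- added/changed/removed in one two-pointer merge sweep (objective: alternative, same cost).
-- Both arguments are dicts under the type convention, so A's isinstance guard is statically
-- true and the "state_delta=unavailable" branch is dead code in both ports.

-- ===== PORT A =====
-- shared helper: both Python sources carry the identical _preview_keys (limit = 8)
def previewKeys (keys : List String) : String :=
  if keys = [] then "-"
  else if keys.length ≤ 8 then PySem.Str.join "," keys
  else PySem.Str.join "," (PySem.List.slice keys none (some 8)) ++ ",..."

def format_state_delta_py (before : List (String × Int)) (after : List (String × Int)) : String :=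
  let bd := PySem.Dict.ofList before
  let ad := PySem.Dict.ofList after
  let beforeKeys : PySem.Set String := PySem.Set.ofList (PySem.Dict.keys bd)
  let afterKeys : PySem.Set String := PySem.Set.ofList (PySem.Dict.keys ad)
  let addedKeys := PySem.List.sorted (PySem.Set.diff afterKeys beforeKeys) (fun x => x) false
  let removedKeys := PySem.List.sorted (PySem.Set.diff beforeKeys afterKeys) (fun x => x) false
  let sharedKeys := PySem.Set.inter beforeKeys afterKeys
  -- sorted over a set comprehension: key order is made deterministic by the sort (distinct keys)
  let changedKeys := PySem.List.sorted
    (sharedKeys.filter (fun key => PySem.Dict.get? bd key != PySem.Dict.get? ad key)) (fun x => x) false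
  "state_delta=" ++
    "added[" ++ PySem.Int.toStr (addedKeys.length : Int) ++ "]=" ++ previewKeys addedKeys ++ "; " ++
    "changed[" ++ PySem.Int.toStr (changedKeys.length : Int) ++ "]=" ++ previewKeys changedKeys ++ "; " ++
    "removed[" ++ PySem.Int.toStr (removedKeys.length : Int) ++ "]=" ++ previewKeys removedKeys

-- ===== PORT B =====
-- the while loop with two cursors, ported as recursion on the two (sorted) key lists;
-- the accumulators (added, changed, removed) are appended to exactly as the Python appends
def mergeDelta (bd ad : PySem.Dict String Int) :
    List String → List String → List String × List String × List String → List String × List String × List String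
  | [], aks, (add, chg, rem) => (add ++ aks, chg, rem)          -- added.extend(aks[j:]) (and removed.extend of the empty rest)
  | b :: bks, [], (add, chg, rem) => (add, chg, rem ++ (b :: bks))  -- removed.extend(bks[i:])
  | b :: bks, a :: aks, (add, chg, rem) =>
    if b < a then mergeDelta bd ad bks (a :: aks) (add, chg, rem ++ [b])
    else if a < b then mergeDelta bd ad (b :: bks) aks (add ++ [a], chg, rem)
    else mergeDelta bd ad bks aks
      (add, if PySem.Dict.get? bd b != PySem.Dict.get? ad a then chg ++ [b] else chg, rem)

def format_state_delta_py_alt (before : List (String × Int)) (after : List (String × Int)) : String :=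
  let bd := PySem.Dict.ofList before
  let ad := PySem.Dict.ofList after
  let bks := PySem.List.sorted (PySem.Dict.keys bd) (fun x => x) false
  let aks := PySem.List.sorted (PySem.Dict.keys ad) (fun x => x) false
  let acr := mergeDelta bd ad bks aks ([], [], [])
  let added := acr.1
  let changed := acr.2.1
  let removed := acr.2.2
  "state_delta=" ++
    "added[" ++ PySem.Int.toStr (added.length : Int) ++ "]=" ++ previewKeys added ++ "; " ++
    "changed[" ++ PySem.Int.toStr (changed.length : Int) ++ "]=" ++ previewKeys changed ++ "; " ++
    "removed[" ++ PySem.Int.toStr (removed.length : Int) ++ "]=" ++ previewKeys removed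

-- ===== PRECONDITION & SPEC =====
def Spec_format_state_delta_py (before : List (String × Int)) (after : List (String × Int)) (out : String) : Prop := out = format_state_delta_py_alt before after
instance (before : List (String × Int)) (after : List (String × Int)) (out : String) : Decidable (Spec_format_state_delta_py before after out) := by unfold Spec_format_state_delta_py; infer_instance

-- ===== CLAIM (what is proved, stated in full; the proofs are below) =====
def Claim_equal_format_state_delta_py : Prop := ∀ (before : List (String × Int)) (after : List (String × Int)), Dom_format_state_delta_py before after → Spec_format_state_delta_py before after (format_state_delta_py before after)

-- ===== LEMMAS AND PROOFS =====

-- the merge of two strictly increasing key lists is the three classification filters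
theorem mergeDelta_eq (bd ad : PySem.Dict String Int) (bks aks : List String)
    (p : List String × List String × List String)
    (hb : bks.Pairwise (· < ·)) (ha : aks.Pairwise (· < ·)) :
    mergeDelta bd ad bks aks p =
      (p.1 ++ aks.filter (fun k => !bks.contains k),
       p.2.1 ++ aks.filter (fun k => bks.contains k && (PySem.Dict.get? bd k != PySem.Dict.get? ad k)),
       p.2.2 ++ bks.filter (fun k => !aks.contains k)) := by
  revert hb ha
  induction bks, aks, p using mergeDelta.induct bd ad with
  | case1 aks add chg rem => intro hb ha; simp [mergeDelta]
  | case2 b bks add chg rem => intro hb ha; simp [mergeDelta]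
  | case3 b bks a aks add chg rem hlt ih =>
    intro hb ha
    rw [mergeDelta, if_pos hlt, ih hb.tail ha]
    have hbk : ∀ k, k ∈ a :: aks → b < k := by
      intro k hk
      rcases List.mem_cons.mp hk with h | h
      · exact h ▸ hlt
      · exact lt_trans hlt ((List.pairwise_cons.mp ha).1 k h)
    have h1 : ∀ k ∈ a :: aks, ((b :: bks).contains k) = (bks.contains k) := by
      intro k hk; simp [(ne_of_lt (hbk k hk)).symm]
    have h2 : (a :: aks).filter (fun k => !(b :: bks).contains k)
        = (a :: aks).filter (fun k => !bks.contains k) :=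
      List.filter_congr (by intro k hk; rw [h1 k hk])
    have h3 : (a :: aks).filter (fun k => (b :: bks).contains k && (PySem.Dict.get? bd k != PySem.Dict.get? ad k))
        = (a :: aks).filter (fun k => bks.contains k && (PySem.Dict.get? bd k != PySem.Dict.get? ad k)) :=
      List.filter_congr (by intro k hk; rw [h1 k hk])
    have hba : b ≠ a := ne_of_lt hlt
    have hbn : b ∉ aks := fun h => (ne_of_lt (hbk b (List.mem_cons_of_mem a h))) rfl
    rw [h2, h3]
    simp [List.filter_cons, hba, hbn]
  | case4 b bks a aks add chg rem hnlt hlt ih =>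
    intro hb ha
    rw [mergeDelta, if_neg hnlt, if_pos hlt, ih hb ha.tail]
    have hak : ∀ k, k ∈ b :: bks → a < k := by
      intro k hk
      rcases List.mem_cons.mp hk with h | h
      · exact h ▸ hlt
      · exact lt_trans hlt ((List.pairwise_cons.mp hb).1 k h)
    have h1 : ∀ k ∈ b :: bks, ((a :: aks).contains k) = (aks.contains k) := by
      intro k hk; simp [(ne_of_lt (hak k hk)).symm]
    have h2 : (b :: bks).filter (fun k => !(a :: aks).contains k)
        = (b :: bks).filter (fun k => !aks.contains k) :=
      List.filter_congr (by intro k hk; rw [h1 k hk])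
    have hab : a ≠ b := ne_of_lt hlt
    have han : a ∉ bks := fun h => lt_irrefl a (hak a (List.mem_cons_of_mem b h))
    rw [h2]
    simp [List.filter_cons, hab, han]
  | case5 b bks a aks add chg rem hnlt hnlt2 ih =>
    intro hb ha
    obtain rfl : a = b := le_antisymm (not_lt.mp hnlt) (not_lt.mp hnlt2)
    rw [mergeDelta, if_neg hnlt, if_neg hnlt2]
    have htb : ∀ k ∈ bks, ((a :: aks).contains k) = (aks.contains k) := by
      intro k hk
      simp [(ne_of_lt ((List.pairwise_cons.mp hb).1 k hk)).symm]
    have hta : ∀ k ∈ aks, ((a :: bks).contains k) = (bks.contains k) := by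
      intro k hk
      simp [(ne_of_lt ((List.pairwise_cons.mp ha).1 k hk)).symm]
    have h2 : bks.filter (fun k => !(a :: aks).contains k)
        = bks.filter (fun k => !aks.contains k) :=
      List.filter_congr (by intro k hk; rw [htb k hk])
    have h3 : aks.filter (fun k => !(a :: bks).contains k)
        = aks.filter (fun k => !bks.contains k) :=
      List.filter_congr (by intro k hk; rw [hta k hk])
    have h4 : aks.filter (fun k => (a :: bks).contains k && (PySem.Dict.get? bd k != PySem.Dict.get? ad k))
        = aks.filter (fun k => bks.contains k && (PySem.Dict.get? bd k != PySem.Dict.get? ad k)) :=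
      List.filter_congr (by intro k hk; rw [hta k hk])
    have e1 : (a :: aks).filter (fun k => !(a :: bks).contains k)
        = aks.filter (fun k => !bks.contains k) := by
      rw [List.filter_cons, h3]; simp
    have e3 : (a :: bks).filter (fun k => !(a :: aks).contains k)
        = bks.filter (fun k => !aks.contains k) := by
      rw [List.filter_cons, h2]; simp
    by_cases hd : (PySem.Dict.get? bd a != PySem.Dict.get? ad a) = true
    · have e2 : (a :: aks).filter (fun k => (a :: bks).contains k && (PySem.Dict.get? bd k != PySem.Dict.get? ad k))
          = a :: aks.filter (fun k => bks.contains k && (PySem.Dict.get? bd k != PySem.Dict.get? ad k)) := by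
        rw [List.filter_cons, h4]; simp [hd]
      simp only [dif_pos hd] at ih
      rw [if_pos hd, ih hb.tail ha.tail, e1, e2, e3]
      simp
    · have e2 : (a :: aks).filter (fun k => (a :: bks).contains k && (PySem.Dict.get? bd k != PySem.Dict.get? ad k))
          = aks.filter (fun k => bks.contains k && (PySem.Dict.get? bd k != PySem.Dict.get? ad k)) := by
        rw [List.filter_cons, h4]; simp [hd]
      simp only [dif_neg hd] at ih
      rw [if_neg hd, ih hb.tail ha.tail, e1, e2, e3]

-- strictly sorted key order for a duplicate-free list
theorem sorted_nodup_pairwise_lt (xs : List String) (h : xs.Nodup) :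
    (PySem.List.sorted xs (fun x => x) false).Pairwise (· < ·) := by
  have := PySem.List.sorted_ofList_pairwise_lt (xs := xs)
  rwa [PySem.Set.ofList_eq_self_of_nodup _ h] at this

-- sorted of a filter = filter of sorted (distinct keys)
theorem sorted_filter_comm (xs : List String) (h : xs.Nodup) (p : String → Bool) :
    PySem.List.sorted (xs.filter p) (fun x => x) false
      = (PySem.List.sorted xs (fun x => x) false).filter p :=
  PySem.List.sorted_eq_of_perm_of_pairwise_lt _ _ _
    ((PySem.List.sorted_perm xs (fun x => x) false).filter p)
    ((sorted_nodup_pairwise_lt xs h).sublist List.filter_sublist)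

-- membership in a sorted list is membership in the original
theorem contains_sorted (xs : List String) (k : String) :
    (PySem.List.sorted xs (fun x => x) false).contains k = xs.contains k := by
  simp [List.contains_eq_mem, PySem.List.mem_sorted]

theorem format_state_delta_py_eq (before : List (String × Int)) (after : List (String × Int)) :
    format_state_delta_py before after = format_state_delta_py_alt before after := by
  unfold format_state_delta_py format_state_delta_py_alt
  dsimp only
  have hbn := PySem.Dict.nodup_keys_ofList before
  have han := PySem.Dict.nodup_keys_ofList after
  rw [mergeDelta_eq _ _ _ _ _ (sorted_nodup_pairwise_lt _ hbn) (sorted_nodup_pairwise_lt _ han)]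
  simp only [PySem.Set.ofList_eq_self_of_nodup _ hbn, PySem.Set.ofList_eq_self_of_nodup _ han,
    PySem.Set.diff, PySem.Set.inter, PySem.Set.contains, List.filter_filter, List.nil_append]
  have e1 : (PySem.List.sorted (PySem.Dict.ofList after).keys (fun x => x) false).filter
        (fun k => !(PySem.List.sorted (PySem.Dict.ofList before).keys (fun x => x) false).contains k)
      = PySem.List.sorted (((PySem.Dict.ofList after).keys).filter
          (fun k => !((PySem.Dict.ofList before).keys).contains k)) (fun x => x) false := by
    rw [sorted_filter_comm _ han]
    exact List.filter_congr (by intro k _; rw [contains_sorted])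
  have e3 : (PySem.List.sorted (PySem.Dict.ofList before).keys (fun x => x) false).filter
        (fun k => !(PySem.List.sorted (PySem.Dict.ofList after).keys (fun x => x) false).contains k)
      = PySem.List.sorted (((PySem.Dict.ofList before).keys).filter
          (fun k => !((PySem.Dict.ofList after).keys).contains k)) (fun x => x) false := by
    rw [sorted_filter_comm _ hbn]
    exact List.filter_congr (by intro k _; rw [contains_sorted])
  have e2 : (PySem.List.sorted (PySem.Dict.ofList after).keys (fun x => x) false).filter
        (fun k => (PySem.List.sorted (PySem.Dict.ofList before).keys (fun x => x) false).contains k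
          && (PySem.Dict.get? (PySem.Dict.ofList before) k != PySem.Dict.get? (PySem.Dict.ofList after) k))
      = PySem.List.sorted (((PySem.Dict.ofList before).keys).filter
          (fun a => (PySem.Dict.get? (PySem.Dict.ofList before) a != PySem.Dict.get? (PySem.Dict.ofList after) a)
            && ((PySem.Dict.ofList after).keys).contains a)) (fun x => x) false := by
    rw [List.filter_congr (fun k _ => by rw [contains_sorted] :
        ∀ k ∈ PySem.List.sorted (PySem.Dict.ofList after).keys (fun x => x) false, _),
      ← sorted_filter_comm _ han]
    refine PySem.List.sorted_eq_sorted_of_perm _ _ _ (fun _ _ h => h) ?_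
    refine (List.perm_ext_iff_of_nodup (han.filter _) (hbn.filter _)).mpr ?_
    intro k
    simp only [List.mem_filter, List.contains_eq_mem, decide_eq_true_eq, Bool.and_eq_true]
    tauto
  rw [e1, e2, e3]

-- ===== VERDICT (by name: the statement is the Claim_ definition above) =====
theorem format_state_delta_py_spec : Claim_equal_format_state_delta_py := by
  intro before after _
  unfold Spec_format_state_delta_py
  exact format_state_delta_py_eq before after
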